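-- pv_equiv track=rewrite | github.com/mohamedAziz-bousbih/Smart-medical-card-emulator | smart_card_terminal.py | filter_data_by_role
-- ===== SOURCE A (Python) =====
-- def filter_data_by_role(data, role):
--     if role == "Doctor":
--         return data
--     elif role == "EMT":
--         return {k: data[k] for k in ["name", "blood_type", "allergies", "conditions", "emergency_contact"] if k in data}
--     elif role == "Pharmacist":
--         return {k: data[k] for k in ["name", "medications"] if k in data}
--     return {}
-- ===== SOURCE B (Python) =====
-- ROLE_RANK = {
--     "EMT": {"name": 0, "blood_type": 1, "allergies": 2, "conditions": 3,
--             "emergency_contact": 4},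
--     "Pharmacist": {"name": 0, "medications": 1},
-- }
--
--
-- def filter_data_by_role(data, role):
--     if role == "Doctor":
--         return data
--     rank = ROLE_RANK.get(role, {})
--     items = [(k, v) for k, v in data.items() if k in rank]
--     items.sort(key=lambda kv: rank[kv[0]])
--     return dict(items)
-- ===== Notes on version B (the rewrite author's own statement) =====
-- stated objective: alternative
-- what changed: Instead of iterating a fixed per-role key list and probing the dict, B iterates the data's items once, filters them through a role->key-rank table, and sorts the kept items by rank to restore the canonical field order.
import Mathlib
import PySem

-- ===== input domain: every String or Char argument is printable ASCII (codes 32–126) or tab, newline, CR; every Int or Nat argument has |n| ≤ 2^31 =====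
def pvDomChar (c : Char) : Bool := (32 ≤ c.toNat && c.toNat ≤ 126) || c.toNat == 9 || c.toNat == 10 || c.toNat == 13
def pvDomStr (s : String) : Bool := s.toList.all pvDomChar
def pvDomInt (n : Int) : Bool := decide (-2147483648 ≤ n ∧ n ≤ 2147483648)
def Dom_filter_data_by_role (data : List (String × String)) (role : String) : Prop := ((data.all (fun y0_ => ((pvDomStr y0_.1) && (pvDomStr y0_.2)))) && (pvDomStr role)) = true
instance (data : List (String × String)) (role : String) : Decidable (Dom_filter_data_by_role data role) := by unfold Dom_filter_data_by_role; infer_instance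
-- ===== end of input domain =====

-- B filters the data's items through a role->rank table and sorts the kept items by rank,
-- instead of A's probing of the dict along a fixed per-role key list; objective: alternative.

-- ===== PORT A =====
-- {k: data[k] for k in keys if k in data}: iterate the fixed key list, keep k with data's
-- first-match value when k is a key of data; the fixed lists have distinct keys, so dict
-- insertion is exactly appending the fresh pair.
def pvComprehend (data : List (String × String)) (keys : List String) : List (String × String) :=
  keys.foldl (fun acc k =>
    match data.find? (fun p => p.1 == k) with
    | some p => acc ++ [(k, p.2)]
    | none => acc) []

def filter_data_by_role (data : List (String × String)) (role : String) : List (String × String) :=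
  if role == "Doctor" then data
  else if role == "EMT" then
    pvComprehend data ["name", "blood_type", "allergies", "conditions", "emergency_contact"]
  else if role == "Pharmacist" then
    pvComprehend data ["name", "medications"]
  else []

-- ===== PORT B =====
-- ROLE_RANK: role -> {field: rank}; the outer constant is only ever looked up with .get,
-- the inner dicts are PySem.Dict.
def pvRoleRank : List (String × PySem.Dict String Int) :=
  [("EMT", PySem.Dict.ofList [("name", 0), ("blood_type", 1), ("allergies", 2),
                              ("conditions", 3), ("emergency_contact", 4)]),
   ("Pharmacist", PySem.Dict.ofList [("name", 0), ("medications", 1)])]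

def filter_data_by_role_alt (data : List (String × String)) (role : String) : List (String × String) :=
  if role == "Doctor" then data
  else
    -- rank = ROLE_RANK.get(role, {})
    let rank := ((pvRoleRank.find? (fun p => p.1 == role)).map (·.2)).getD PySem.Dict.empty
    -- items = [(k, v) for k, v in data.items() if k in rank]
    let items := data.filter (fun kv => rank.contains kv.1)
    -- items.sort(key=lambda kv: rank[kv[0]]); every kept key is a key of rank, so getD
    -- with an unused default is exact (Python's rank[kv[0]] never raises here).
    let items := PySem.List.sorted items (fun kv => rank.getD kv.1 0)
    -- return dict(items)
    (PySem.Dict.ofList items).items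

-- ===== PRECONDITION & SPEC =====
-- Pre_ excludes association lists with duplicate keys: they do not represent a Python dict
-- ('data' is a dict argument, whose keys are necessarily distinct).
def Pre_filter_data_by_role (data : List (String × String)) (role : String) : Prop :=
  (data.map Prod.fst).Nodup
instance (data : List (String × String)) (role : String) : Decidable (Pre_filter_data_by_role data role) := by unfold Pre_filter_data_by_role; infer_instance

def pvWitness_filter_data_by_role : (List (String × String)) × String :=
  ([("name", "Bob"), ("blood_type", "O+"), ("age", "40")], "EMT")

def Spec_filter_data_by_role (data : List (String × String)) (role : String) (out : List (String × String)) : Prop := out = filter_data_by_role_alt data role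
instance (data : List (String × String)) (role : String) (out : List (String × String)) : Decidable (Spec_filter_data_by_role data role out) := by unfold Spec_filter_data_by_role; infer_instance

-- ===== CLAIM =====
def Claim_equal_filter_data_by_role : Prop := ∀ (data : List (String × String)) (role : String), Dom_filter_data_by_role data role → Pre_filter_data_by_role data role → Spec_filter_data_by_role data role (filter_data_by_role data role)

-- ===== LEMMAS AND PROOFS =====

-- A's comprehension body as an Option-valued map of one key.
def pvF (data : List (String × String)) (k : String) : Option (String × String) :=
  (data.find? (fun p => p.1 == k)).map (fun p => (k, p.2))

theorem pvComprehend_aux (data : List (String × String)) :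
    ∀ (keys : List String) (acc : List (String × String)),
      keys.foldl (fun acc k =>
        match data.find? (fun p => p.1 == k) with
        | some p => acc ++ [(k, p.2)]
        | none => acc) acc
        = acc ++ keys.filterMap (pvF data) := by
  intro keys
  induction keys with
  | nil => intro acc; simp
  | cons k keys ih =>
    intro acc
    simp only [List.foldl_cons, List.filterMap_cons]
    cases h : data.find? (fun p => p.1 == k) with
    | none =>
      rw [show pvF data k = none by simp [pvF, h]]
      simpa [h] using ih acc
    | some p =>
      rw [show pvF data k = some (k, p.2) by simp [pvF, h]]
      simp [h, ih (acc ++ [(k, p.2)])]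

-- A's comprehension is a filterMap over the key list.
theorem pvComprehend_eq_filterMap (data : List (String × String)) (keys : List String) :
    pvComprehend data keys = keys.filterMap (pvF data) := by
  simpa using pvComprehend_aux data keys []

-- find? on a nodup-keyed association list is plain membership.
theorem pvFind?_iff (data : List (String × String)) (k : String) (p : String × String)
    (hnd : (data.map Prod.fst).Nodup) :
    data.find? (fun q => q.1 == k) = some p ↔ p ∈ data ∧ p.1 = k := by
  induction data with
  | nil => simp
  | cons q rest ih =>
    simp only [List.map_cons, List.nodup_cons] at hnd
    obtain ⟨hq, hrest⟩ := hnd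
    by_cases hk : q.1 = k
    · rw [List.find?_cons_of_pos (by simp [hk])]
      constructor
      · rintro h; injection h with h; subst h; exact ⟨List.mem_cons_self .., hk⟩
      · rintro ⟨hmem, hpk⟩
        rcases List.mem_cons.mp hmem with h | h
        · simp [h]
        · have : q.1 ∈ rest.map Prod.fst := by
            rw [hk, ← hpk]; exact List.mem_map_of_mem h
          exact absurd this hq
    · rw [List.find?_cons_of_neg (by simp [hk])]
      rw [ih hrest]
      constructor
      · rintro ⟨hmem, hpk⟩; exact ⟨List.mem_cons_of_mem _ hmem, hpk⟩
      · rintro ⟨hmem, hpk⟩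
        rcases List.mem_cons.mp hmem with h | h
        · exact absurd (h ▸ hpk) hk
        · exact ⟨h, hpk⟩

-- The shared non-Doctor branch: B's filter-and-sort equals A's comprehension, for any
-- rank table whose keys are exactly the key list L and whose ranks are increasing along L.
theorem pvBranch_eq (data : List (String × String)) (rank : PySem.Dict String Int)
    (L : List String)
    (hnd : (data.map Prod.fst).Nodup)
    (hkeys : ∀ k, rank.contains k = true ↔ k ∈ L)
    (hmono : L.Pairwise (fun a b => rank.getD a 0 < rank.getD b 0)) :
    (PySem.Dict.ofList (PySem.List.sorted (data.filter (fun kv => rank.contains kv.1))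
        (fun kv => rank.getD kv.1 0))).items
      = L.filterMap (pvF data) := by
  set key : (String × String) → Int := fun kv => rank.getD kv.1 0 with hkey
  set R := L.filterMap (pvF data) with hR
  have hfst : ∀ k y, pvF data k = some y → y.1 = k := by
    intro k y hy
    simp only [pvF, Option.map_eq_some_iff] at hy
    obtain ⟨p, _, rfl⟩ := hy; rfl
  have hpw : R.Pairwise (fun a b => key a < key b) := by
    rw [hR, List.pairwise_filterMap]
    refine hmono.imp_of_mem ?_
    intro a b _ _ hab y hy y' hy'
    rw [hkey]
    simp only [hfst a y hy, hfst b y' hy']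
    exact hab
  have hRnd : R.Nodup := (hpw.imp (fun h => by rintro rfl; exact lt_irrefl _ h))
  have hdnd : data.Nodup := List.Nodup.of_map _ hnd
  have hfilnd : (data.filter (fun kv => rank.contains kv.1)).Nodup := hdnd.filter _
  have hmem : ∀ x, x ∈ R ↔ x ∈ data.filter (fun kv => rank.contains kv.1) := by
    intro x
    rw [hR, List.mem_filterMap, List.mem_filter]
    constructor
    · rintro ⟨k, hkL, hx⟩
      simp only [pvF, Option.map_eq_some_iff] at hx
      obtain ⟨p, hp, rfl⟩ := hx
      obtain ⟨hpd, hpk⟩ := (pvFind?_iff data k p hnd).mp hp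
      subst hpk
      exact ⟨by simpa using hpd, by rw [hkeys]; simpa using hkL⟩
    · rintro ⟨hxd, hxk⟩
      refine ⟨x.1, (hkeys x.1).mp hxk, ?_⟩
      simp only [pvF, Option.map_eq_some_iff]
      exact ⟨x, (pvFind?_iff data x.1 x hnd).mpr ⟨hxd, rfl⟩, by simp⟩
  have hperm : R.Perm (data.filter (fun kv => rank.contains kv.1)) :=
    (List.perm_ext_iff_of_nodup hRnd hfilnd).mpr hmem
  have hsorted : PySem.List.sorted (data.filter (fun kv => rank.contains kv.1)) key = R :=
    PySem.List.sorted_eq_of_perm_of_pairwise_lt _ _ _ hperm hpw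
  rw [hsorted]
  have hkeysnd : (R.map Prod.fst).Nodup := by
    rw [List.nodup_iff_pairwise_ne] at *
    rw [List.pairwise_map]
    refine hpw.imp ?_
    intro a b hab hc
    rw [hkey] at hab
    simp only [hc] at hab
    exact lt_irrefl _ hab
  have := PySem.Dict.items_foldl_insert_fresh R Prod.fst Prod.snd PySem.Dict.empty
    (fun a _ => by simp) hkeysnd
  simpa [PySem.Dict.ofList, PySem.Dict.update] using this

-- The two role tables satisfy pvBranch_eq's hypotheses.
theorem pvKeys_EMT : ∀ k, (PySem.Dict.mk [("name", (0:Int)), ("blood_type", 1), ("allergies", 2), ("conditions", 3), ("emergency_contact", 4)]).contains k = true ↔ k ∈ ["name", "blood_type", "allergies", "conditions", "emergency_contact"] := by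
  intro k
  rw [PySem.Dict.contains_mk]
  simp only [List.any_cons, List.any_nil, Bool.or_eq_true, beq_iff_eq, List.mem_cons,
    List.not_mem_nil, or_false, Bool.false_eq_true]
  tauto

theorem pvKeys_Pharm : ∀ k, (PySem.Dict.mk [("name", (0:Int)), ("medications", 1)]).contains k = true ↔ k ∈ ["name", "medications"] := by
  intro k
  rw [PySem.Dict.contains_mk]
  simp only [List.any_cons, List.any_nil, Bool.or_eq_true, beq_iff_eq, List.mem_cons,
    List.not_mem_nil, or_false, Bool.false_eq_true]
  tauto

-- ===== VERDICT =====
theorem filter_data_by_role_spec : Claim_equal_filter_data_by_role := by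
  intro data role _ hnd
  unfold Spec_filter_data_by_role
  by_cases h1 : role = "Doctor"
  · simp [filter_data_by_role, filter_data_by_role_alt, h1]
  · by_cases h2 : role = "EMT"
    · subst h2
      have hA : filter_data_by_role data "EMT"
          = pvComprehend data ["name", "blood_type", "allergies", "conditions", "emergency_contact"] := by
        rw [filter_data_by_role, if_neg (by decide), if_pos (by decide)]
      have hrk : ((pvRoleRank.find? (fun p => p.1 == "EMT")).map (·.2)).getD PySem.Dict.empty
          = PySem.Dict.mk [("name", (0:Int)), ("blood_type", 1), ("allergies", 2), ("conditions", 3), ("emergency_contact", 4)] := by decide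
      have hB : filter_data_by_role_alt data "EMT"
          = (PySem.Dict.ofList (PySem.List.sorted (data.filter (fun kv => (PySem.Dict.mk [("name", (0:Int)), ("blood_type", 1), ("allergies", 2), ("conditions", 3), ("emergency_contact", 4)]).contains kv.1)) (fun kv => (PySem.Dict.mk [("name", (0:Int)), ("blood_type", 1), ("allergies", 2), ("conditions", 3), ("emergency_contact", 4)]).getD kv.1 0))).items := by
        rw [filter_data_by_role_alt, if_neg (by decide)]
        simp only [hrk]
      rw [hA, hB, pvComprehend_eq_filterMap]
      exact (pvBranch_eq data _ _ hnd pvKeys_EMT (by decide)).symm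
    · by_cases h3 : role = "Pharmacist"
      · subst h3
        have hA : filter_data_by_role data "Pharmacist"
            = pvComprehend data ["name", "medications"] := by
          rw [filter_data_by_role, if_neg (by decide), if_neg (by decide), if_pos (by decide)]
        have hrk : ((pvRoleRank.find? (fun p => p.1 == "Pharmacist")).map (·.2)).getD PySem.Dict.empty
            = PySem.Dict.mk [("name", (0:Int)), ("medications", 1)] := by decide
        have hB : filter_data_by_role_alt data "Pharmacist"
            = (PySem.Dict.ofList (PySem.List.sorted (data.filter (fun kv => (PySem.Dict.mk [("name", (0:Int)), ("medications", 1)]).contains kv.1)) (fun kv => (PySem.Dict.mk [("name", (0:Int)), ("medications", 1)]).getD kv.1 0))).items := by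
          rw [filter_data_by_role_alt, if_neg (by decide)]
          simp only [hrk]
        rw [hA, hB, pvComprehend_eq_filterMap]
        exact (pvBranch_eq data _ _ hnd pvKeys_Pharm (by decide)).symm
      · have hA : filter_data_by_role data role = [] := by
          rw [filter_data_by_role, if_neg (by simp [h1]), if_neg (by simp [h2]), if_neg (by simp [h3])]
        have hrk : pvRoleRank.find? (fun p => p.1 == role) = none := by
          simp [pvRoleRank, List.find?, beq_eq_false_iff_ne.mpr (fun h => h2 h.symm),
            beq_eq_false_iff_ne.mpr (fun h => h3 h.symm), List.find?_cons_of_neg]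
        have hfil : data.filter (fun kv => (PySem.Dict.empty : PySem.Dict String Int).contains kv.1) = [] := by
          simp
        have hB : filter_data_by_role_alt data role = [] := by
          rw [filter_data_by_role_alt, if_neg (by simp [h1])]
          simp only [hrk, Option.map_none, Option.getD_none, hfil]
          rfl
        rw [hA, hB]
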